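-- pv_equiv track=rewrite | github.com/KV1k1/3D-GUI | adapters/wxpython/silhouette_minigame.py | _build_patterns
-- ===== SOURCE A (Python) =====
-- def _build_patterns(n: int) -> list[list[list[int]]]:
--     def empty() -> list[list[int]]:
--         return [[0 for _ in range(n)] for _ in range(n)]
--
--     def add_rect(p: list[list[int]], r0: int, c0: int, r1: int, c1: int) -> None:
--         for r in range(r0, r1 + 1):
--             for c in range(c0, c1 + 1):
--                 if 0 <= r < n and 0 <= c < n:
--                     p[r][c] = 1
--
--     patterns: list[list[list[int]]] = []
--
--     p = empty()
--     add_rect(p, 1, 1, 1, 4)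
--     add_rect(p, 2, 3, 4, 3)
--     add_rect(p, 4, 1, 4, 2)
--     patterns.append(p)
--
--     p = empty()
--     add_rect(p, 1, 2, 4, 3)
--     add_rect(p, 1, 1, 1, 4)
--     patterns.append(p)
--
--     p = empty()
--     add_rect(p, 1, 2, 4, 3)
--     add_rect(p, 0, 2, 1, 3)
--     add_rect(p, 4, 1, 4, 4)
--     patterns.append(p)
--
--     p = empty()
--     add_rect(p, 2, 1, 3, 4)
--     add_rect(p, 1, 2, 4, 3)
--     patterns.append(p)
--
--     p = empty()
--     add_rect(p, 1, 1, 1, 4)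
--     add_rect(p, 1, 1, 4, 1)
--     add_rect(p, 4, 1, 4, 4)
--     add_rect(p, 2, 4, 4, 4)
--     add_rect(p, 2, 2, 2, 3)
--     patterns.append(p)
--
--     return patterns
-- ===== SOURCE B (Python) =====
-- # Patterns as fixed 5x5 ASCII-art stencils: the grid is read straight off the
-- # stencil ('#' -> 1), clipping via the r<5/c<5 guard; no rectangle arithmetic at all.
-- STENCILS = [
--     [".....",
--      ".####",
--      "...#.",
--      "...#.",
--      ".###."],
--     [".....",
--      ".####",
--      "..##.",
--      "..##.",
--      "..##."],
--     ["..##.",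
--      "..##.",
--      "..##.",
--      "..##.",
--      ".####"],
--     [".....",
--      "..##.",
--      ".####",
--      ".####",
--      "..##."],
--     [".....",
--      ".####",
--      ".####",
--      ".#..#",
--      ".####"],
-- ]
--
--
-- def _build_patterns(n: int) -> list[list[list[int]]]:
--     return [[[1 if r < 5 and c < 5 and art[r][c] == '#' else 0
--               for c in range(n)]
--              for r in range(n)]
--             for art in STENCILS]
-- ===== Notes on version B (the rewrite author's own statement) =====
-- stated objective: alternative
-- what changed: Patterns are stored as fixed ASCII-art stencil bitmaps and the grid is read straight off the stencil ('#' marks a filled cell) with a clip guard over the stencil extent, replacing the empty-grid construction and the imperative rectangle-painting loops entirely.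
import Mathlib
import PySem

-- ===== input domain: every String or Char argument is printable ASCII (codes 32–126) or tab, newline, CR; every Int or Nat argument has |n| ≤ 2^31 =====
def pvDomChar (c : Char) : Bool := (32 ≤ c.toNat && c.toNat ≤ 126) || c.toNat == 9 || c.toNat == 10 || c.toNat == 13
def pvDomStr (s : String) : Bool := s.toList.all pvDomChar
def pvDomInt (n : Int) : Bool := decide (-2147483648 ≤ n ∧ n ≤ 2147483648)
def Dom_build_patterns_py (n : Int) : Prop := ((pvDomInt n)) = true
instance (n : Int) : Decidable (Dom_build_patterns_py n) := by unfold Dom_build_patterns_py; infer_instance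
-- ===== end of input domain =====

-- B replaces the empty-grid-plus-imperative-rectangle-painting by fixed ASCII-art
-- stencil bitmaps read straight off with a clip guard over the stencil extent (objective: alternative).

-- ===== PORT A =====
-- empty(): [[0 for _ in range(n)] for _ in range(n)]
def pvEmpty (n : Int) : List (List Int) :=
  (PySem.List.pyRange 0 n 1).map (fun _ => (PySem.List.pyRange 0 n 1).map (fun _ => (0 : Int)))

-- add_rect(p, r0, c0, r1, c1): nested loops, bounds check, p[r][c] = 1
def pvAddRect (n : Int) (p : List (List Int)) (r0 c0 r1 c1 : Int) : List (List Int) :=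
  (PySem.List.pyRange r0 (r1 + 1) 1).foldl (fun p r =>
    (PySem.List.pyRange c0 (c1 + 1) 1).foldl (fun p c =>
      if 0 ≤ r ∧ r < n ∧ 0 ≤ c ∧ c < n then
        p.set r.toNat ((p.getD r.toNat []).set c.toNat 1)
      else p) p) p

def build_patterns_py (n : Int) : List (List (List Int)) :=
  let p1 := pvAddRect n (pvAddRect n (pvAddRect n (pvEmpty n) 1 1 1 4) 2 3 4 3) 4 1 4 2
  let p2 := pvAddRect n (pvAddRect n (pvEmpty n) 1 2 4 3) 1 1 1 4
  let p3 := pvAddRect n (pvAddRect n (pvAddRect n (pvEmpty n) 1 2 4 3) 0 2 1 3) 4 1 4 4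
  let p4 := pvAddRect n (pvAddRect n (pvEmpty n) 2 1 3 4) 1 2 4 3
  let p5 := pvAddRect n (pvAddRect n (pvAddRect n (pvAddRect n (pvAddRect n
              (pvEmpty n) 1 1 1 4) 1 1 4 1) 4 1 4 4) 2 4 4 4) 2 2 2 3
  [p1, p2, p3, p4, p5]

-- ===== PORT B =====
-- STENCILS: the fixed ASCII-art bitmaps
def pvStencils : List (List String) :=
  [ [".....", ".####", "...#.", "...#.", ".###."],
    [".....", ".####", "..##.", "..##.", "..##."],
    ["..##.", "..##.", "..##.", "..##.", ".####"],
    [".....", "..##.", ".####", ".####", "..##."],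
    [".....", ".####", ".####", ".#..#", ".####"] ]

-- art[r][c] == '#' (guarded by r < 5 and c < 5, always in range)
def build_patterns_py_alt (n : Int) : List (List (List Int)) :=
  pvStencils.map (fun art =>
    (PySem.List.pyRange 0 n 1).map (fun r =>
      (PySem.List.pyRange 0 n 1).map (fun c =>
        if r < 5 ∧ c < 5 ∧ PySem.List.pyGet? ((PySem.List.pyGet? art r).getD "").toList c = some '#'
        then (1 : Int) else 0)))

-- ===== PRECONDITION & SPEC =====
def Spec_build_patterns_py (n : Int) (out : List (List (List Int))) : Prop := out = build_patterns_py_alt n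
instance (n : Int) (out : List (List (List Int))) : Decidable (Spec_build_patterns_py n out) := by unfold Spec_build_patterns_py; infer_instance

-- ===== CLAIM (what is proved, stated in full; the proofs are below) =====
def Claim_equal_build_patterns_py : Prop := ∀ (n : Int), Dom_build_patterns_py n → Spec_build_patterns_py n (build_patterns_py n)

-- ===== LEMMAS AND PROOFS =====

-- a grid materialized from a pointwise function (proof-side normal form of both ports)
def pvGridOf (n : Int) (f : Int → Int → Int) : List (List Int) :=
  (PySem.List.pyRange 0 n 1).map (fun r => (PySem.List.pyRange 0 n 1).map (fun c => f r c))

lemma pvGridOf_congr (n : Int) (f g : Int → Int → Int)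
    (h : ∀ r c, 0 ≤ r → r < n → 0 ≤ c → c < n → f r c = g r c) :
    pvGridOf n f = pvGridOf n g := by
  unfold pvGridOf
  refine List.map_congr_left (fun r hr => ?_)
  rw [PySem.List.mem_pyRange_one] at hr
  refine List.map_congr_left (fun c hc => ?_)
  rw [PySem.List.mem_pyRange_one] at hc
  exact h r c hr.1 hr.2 hc.1 hc.2

lemma pv_set_gridOf (n : Int) (f : Int → Int → Int) (r c : Int)
    (hr0 : 0 ≤ r) (hr1 : r < n) (hc0 : 0 ≤ c) (hc1 : c < n) :
    (pvGridOf n f).set r.toNat (((pvGridOf n f).getD r.toNat []).set c.toNat 1)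
      = pvGridOf n (fun r' c' => if r' = r ∧ c' = c then 1 else f r' c') := by
  unfold pvGridOf
  have hlen : (PySem.List.pyRange 0 n 1).length = n.toNat := by
    simp [PySem.List.length_pyRange_one]
  have hrn : r.toNat < n.toNat := by omega
  have hcn : c.toNat < n.toNat := by omega
  apply List.ext_getElem
  · simp
  intro i h1 h2
  simp only [List.getElem_set, List.getElem_map]
  split
  · next hi =>
    subst hi
    have hgetD : ((PySem.List.pyRange 0 n 1).map
        (fun r' => (PySem.List.pyRange 0 n 1).map (fun c' => f r' c'))).getD r.toNat []
        = (PySem.List.pyRange 0 n 1).map (fun c' => f ((PySem.List.pyRange 0 n 1)[r.toNat]'(by simp only [hlen]; omega)) c') := by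
      rw [List.getD_eq_getElem?_getD, List.getElem?_eq_getElem (by simp only [List.length_map, hlen]; omega), List.getElem_map]
      rfl
    rw [hgetD]
    apply List.ext_getElem
    · simp
    intro j hj1 hj2
    simp only [List.getElem_set, List.getElem_map, PySem.List.getElem_pyRange_one]
    have hrv : (0 : Int) + (r.toNat : Int) = r := by omega
    rw [hrv]
    split
    · next hjc =>
      subst hjc
      have : (0 : Int) + (c.toNat : Int) = c := by omega
      rw [this, if_pos ⟨rfl, rfl⟩]
    · next hjc =>
      rw [if_neg]
      rintro ⟨-, hc'⟩
      simp only [List.length_set, List.length_map, hlen] at hj1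
      omega
  · next hi =>
    simp only [PySem.List.getElem_pyRange_one]
    have : ¬ ((0 : Int) + (i : Int) = r) := by
      omega
    congr 1
    funext c'
    rw [if_neg (by tauto)]

lemma pv_inner_fold (n : Int) (r : Int) (cs : List Int) (f : Int → Int → Int) :
    cs.foldl (fun p c => if 0 ≤ r ∧ r < n ∧ 0 ≤ c ∧ c < n then
        p.set r.toNat ((p.getD r.toNat []).set c.toNat 1) else p) (pvGridOf n f)
    = pvGridOf n (fun r' c' =>
        if r' = r ∧ c' ∈ cs ∧ 0 ≤ r ∧ r < n ∧ 0 ≤ c' ∧ c' < n then 1 else f r' c') := by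
  induction cs generalizing f with
  | nil =>
    simp only [List.foldl_nil]
    congr 1
    funext r' c'
    simp
  | cons c cs ih =>
    simp only [List.foldl_cons]
    by_cases h : 0 ≤ r ∧ r < n ∧ 0 ≤ c ∧ c < n
    · rw [if_pos h, pv_set_gridOf n f r c h.1 h.2.1 h.2.2.1 h.2.2.2, ih]
      congr 1
      funext r' c'
      by_cases h1 : r' = r ∧ c' ∈ c :: cs ∧ 0 ≤ r ∧ r < n ∧ 0 ≤ c' ∧ c' < n
      · rw [if_pos h1]
        rcases h1 with ⟨hr', hmem, hrest⟩
        rcases List.mem_cons.mp hmem with hec | hmem'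
        · by_cases h2 : r' = r ∧ c' ∈ cs ∧ 0 ≤ r ∧ r < n ∧ 0 ≤ c' ∧ c' < n
          · rw [if_pos h2]
          · rw [if_neg h2, if_pos ⟨hr', hec⟩]
        · rw [if_pos ⟨hr', hmem', hrest⟩]
      · rw [if_neg h1, if_neg, if_neg]
        · rintro ⟨hr', hec⟩
          subst hec
          exact h1 ⟨hr', List.mem_cons_self, h⟩
        · rintro ⟨hr', hmem', hrest⟩
          exact h1 ⟨hr', List.mem_cons_of_mem _ hmem', hrest⟩
    · rw [if_neg h, ih]
      congr 1
      funext r' c'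
      by_cases h1 : r' = r ∧ c' ∈ cs ∧ 0 ≤ r ∧ r < n ∧ 0 ≤ c' ∧ c' < n
      · rw [if_pos h1, if_pos ⟨h1.1, List.mem_cons_of_mem _ h1.2.1, h1.2.2⟩]
      · rw [if_neg h1, if_neg]
        rintro ⟨hr', hmem, hrest⟩
        rcases List.mem_cons.mp hmem with hec | hmem'
        · subst hec; exact h hrest
        · exact h1 ⟨hr', hmem', hrest⟩

lemma pvAddRect_gridOf (n : Int) (f : Int → Int → Int) (r0 c0 r1 c1 : Int) :
    pvAddRect n (pvGridOf n f) r0 c0 r1 c1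
    = pvGridOf n (fun r c =>
        if (r0 ≤ r ∧ r < r1 + 1) ∧ (c0 ≤ c ∧ c < c1 + 1) ∧ 0 ≤ r ∧ r < n ∧ 0 ≤ c ∧ c < n
        then 1 else f r c) := by
  unfold pvAddRect
  have main : ∀ (rs : List Int) (f : Int → Int → Int),
      rs.foldl (fun p r =>
        (PySem.List.pyRange c0 (c1 + 1) 1).foldl (fun p c =>
          if 0 ≤ r ∧ r < n ∧ 0 ≤ c ∧ c < n then
            p.set r.toNat ((p.getD r.toNat []).set c.toNat 1)
          else p) p) (pvGridOf n f)
      = pvGridOf n (fun r c =>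
          if r ∈ rs ∧ c ∈ PySem.List.pyRange c0 (c1 + 1) 1 ∧ 0 ≤ r ∧ r < n ∧ 0 ≤ c ∧ c < n
          then 1 else f r c) := by
    intro rs
    induction rs with
    | nil => intro f; simp
    | cons a rs ih =>
      intro f
      simp only [List.foldl_cons]
      rw [pv_inner_fold, ih]
      congr 1
      funext r' c'
      by_cases h1 : r' ∈ rs ∧ c' ∈ PySem.List.pyRange c0 (c1 + 1) 1 ∧ 0 ≤ r' ∧ r' < n ∧ 0 ≤ c' ∧ c' < n
      · rw [if_pos h1, if_pos ⟨List.mem_cons_of_mem _ h1.1, h1.2⟩]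
      · by_cases h2 : r' = a ∧ c' ∈ PySem.List.pyRange c0 (c1 + 1) 1 ∧ 0 ≤ a ∧ a < n ∧ 0 ≤ c' ∧ c' < n
        · obtain ⟨hra, hc, hrest⟩ := h2
          subst hra
          rw [if_neg h1, if_pos ⟨rfl, hc, hrest⟩, if_pos ⟨List.mem_cons_self, hc, hrest⟩]
        · rw [if_neg h2, if_neg h1, if_neg]
          rintro ⟨hmem, hrest⟩
          rcases List.mem_cons.mp hmem with hra | hmem'
          · exact h2 ⟨hra, hrest.1, hra ▸ hrest.2.1, hra ▸ hrest.2.2.1, hrest.2.2.2⟩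
          · exact h1 ⟨hmem', hrest⟩
  rw [main]
  simp only [PySem.List.mem_pyRange_one]

-- one cell of B's grid for a fixed stencil
def pvStCell (art : List String) (r c : Int) : Int :=
  if r < 5 ∧ c < 5 ∧ PySem.List.pyGet? ((PySem.List.pyGet? art r).getD "").toList c = some '#'
  then 1 else 0

-- arithmetic characterizations of the five stencils (r, c ≥ 0)
lemma pv_st1 : ∀ r c : Int, 0 ≤ r → 0 ≤ c →
    pvStCell [".....", ".####", "...#.", "...#.", ".###."] r c
    = if (r = 1 ∧ 1 ≤ c ∧ c ≤ 4) ∨ (2 ≤ r ∧ r ≤ 4 ∧ c = 3) ∨ (r = 4 ∧ 1 ≤ c ∧ c ≤ 2) then 1 else 0 := by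
  intro r c hr hc
  by_cases h5 : r < 5 ∧ c < 5
  · obtain ⟨h1, h2⟩ := h5
    interval_cases r <;> interval_cases c <;> decide
  · unfold pvStCell
    rw [if_neg (by rintro ⟨a, b, -⟩; exact h5 ⟨a, b⟩),
        if_neg (by rintro (⟨a, b, d⟩ | ⟨a, b, d⟩ | ⟨a, b, d⟩) <;> exact h5 (by omega))]

lemma pv_st2 : ∀ r c : Int, 0 ≤ r → 0 ≤ c →
    pvStCell [".....", ".####", "..##.", "..##.", "..##."] r c
    = if (1 ≤ r ∧ r ≤ 4 ∧ 2 ≤ c ∧ c ≤ 3) ∨ (r = 1 ∧ 1 ≤ c ∧ c ≤ 4) then 1 else 0 := by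
  intro r c hr hc
  by_cases h5 : r < 5 ∧ c < 5
  · obtain ⟨h1, h2⟩ := h5
    interval_cases r <;> interval_cases c <;> decide
  · unfold pvStCell
    rw [if_neg (by rintro ⟨a, b, -⟩; exact h5 ⟨a, b⟩),
        if_neg (by rintro (⟨a, b, d⟩ | ⟨a, b, d⟩) <;> exact h5 (by omega))]

lemma pv_st3 : ∀ r c : Int, 0 ≤ r → 0 ≤ c →
    pvStCell ["..##.", "..##.", "..##.", "..##.", ".####"] r c
    = if (1 ≤ r ∧ r ≤ 4 ∧ 2 ≤ c ∧ c ≤ 3) ∨ (r ≤ 1 ∧ 2 ≤ c ∧ c ≤ 3) ∨ (r = 4 ∧ 1 ≤ c ∧ c ≤ 4) then 1 else 0 := by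
  intro r c hr hc
  by_cases h5 : r < 5 ∧ c < 5
  · obtain ⟨h1, h2⟩ := h5
    interval_cases r <;> interval_cases c <;> decide
  · unfold pvStCell
    rw [if_neg (by rintro ⟨a, b, -⟩; exact h5 ⟨a, b⟩),
        if_neg (by rintro (⟨a, b, d⟩ | ⟨a, b, d⟩ | ⟨a, b, d⟩) <;> exact h5 (by omega))]

lemma pv_st4 : ∀ r c : Int, 0 ≤ r → 0 ≤ c →
    pvStCell [".....", "..##.", ".####", ".####", "..##."] r c
    = if (2 ≤ r ∧ r ≤ 3 ∧ 1 ≤ c ∧ c ≤ 4) ∨ (1 ≤ r ∧ r ≤ 4 ∧ 2 ≤ c ∧ c ≤ 3) then 1 else 0 := by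
  intro r c hr hc
  by_cases h5 : r < 5 ∧ c < 5
  · obtain ⟨h1, h2⟩ := h5
    interval_cases r <;> interval_cases c <;> decide
  · unfold pvStCell
    rw [if_neg (by rintro ⟨a, b, -⟩; exact h5 ⟨a, b⟩),
        if_neg (by rintro (⟨a, b, d⟩ | ⟨a, b, d⟩) <;> exact h5 (by omega))]

lemma pv_st5 : ∀ r c : Int, 0 ≤ r → 0 ≤ c →
    pvStCell [".....", ".####", ".####", ".#..#", ".####"] r c
    = if (r = 1 ∧ 1 ≤ c ∧ c ≤ 4) ∨ (1 ≤ r ∧ r ≤ 4 ∧ c = 1) ∨ (r = 4 ∧ 1 ≤ c ∧ c ≤ 4) ∨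
         (2 ≤ r ∧ r ≤ 4 ∧ c = 4) ∨ (r = 2 ∧ 2 ≤ c ∧ c ≤ 3) then 1 else 0 := by
  intro r c hr hc
  by_cases h5 : r < 5 ∧ c < 5
  · obtain ⟨h1, h2⟩ := h5
    interval_cases r <;> interval_cases c <;> decide
  · unfold pvStCell
    rw [if_neg (by rintro ⟨a, b, -⟩; exact h5 ⟨a, b⟩),
        if_neg (by rintro (⟨a, b, d⟩ | ⟨a, b, d⟩ | ⟨a, b, d⟩ | ⟨a, b, d⟩ | ⟨a, b, d⟩) <;> exact h5 (by omega))]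

lemma pv_pat1 (n : Int) :
    pvAddRect n (pvAddRect n (pvAddRect n (pvEmpty n) 1 1 1 4) 2 3 4 3) 4 1 4 2
    = (PySem.List.pyRange 0 n 1).map (fun r => (PySem.List.pyRange 0 n 1).map (fun c =>
        pvStCell [".....", ".####", "...#.", "...#.", ".###."] r c)) := by
  have he : pvEmpty n = pvGridOf n (fun _ _ => 0) := rfl
  rw [he, pvAddRect_gridOf, pvAddRect_gridOf, pvAddRect_gridOf]
  show _ = pvGridOf n (fun r c => pvStCell [".....", ".####", "...#.", "...#.", ".###."] r c)
  apply pvGridOf_congr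
  intro r c hr0 hr1 hc0 hc1
  rw [pv_st1 r c hr0 hc0]
  split_ifs <;> omega

lemma pv_pat2 (n : Int) :
    pvAddRect n (pvAddRect n (pvEmpty n) 1 2 4 3) 1 1 1 4
    = (PySem.List.pyRange 0 n 1).map (fun r => (PySem.List.pyRange 0 n 1).map (fun c =>
        pvStCell [".....", ".####", "..##.", "..##.", "..##."] r c)) := by
  have he : pvEmpty n = pvGridOf n (fun _ _ => 0) := rfl
  rw [he, pvAddRect_gridOf, pvAddRect_gridOf]
  show _ = pvGridOf n (fun r c => pvStCell [".....", ".####", "..##.", "..##.", "..##."] r c)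
  apply pvGridOf_congr
  intro r c hr0 hr1 hc0 hc1
  rw [pv_st2 r c hr0 hc0]
  split_ifs <;> omega

lemma pv_pat3 (n : Int) :
    pvAddRect n (pvAddRect n (pvAddRect n (pvEmpty n) 1 2 4 3) 0 2 1 3) 4 1 4 4
    = (PySem.List.pyRange 0 n 1).map (fun r => (PySem.List.pyRange 0 n 1).map (fun c =>
        pvStCell ["..##.", "..##.", "..##.", "..##.", ".####"] r c)) := by
  have he : pvEmpty n = pvGridOf n (fun _ _ => 0) := rfl
  rw [he, pvAddRect_gridOf, pvAddRect_gridOf, pvAddRect_gridOf]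
  show _ = pvGridOf n (fun r c => pvStCell ["..##.", "..##.", "..##.", "..##.", ".####"] r c)
  apply pvGridOf_congr
  intro r c hr0 hr1 hc0 hc1
  rw [pv_st3 r c hr0 hc0]
  split_ifs <;> omega

lemma pv_pat4 (n : Int) :
    pvAddRect n (pvAddRect n (pvEmpty n) 2 1 3 4) 1 2 4 3
    = (PySem.List.pyRange 0 n 1).map (fun r => (PySem.List.pyRange 0 n 1).map (fun c =>
        pvStCell [".....", "..##.", ".####", ".####", "..##."] r c)) := by
  have he : pvEmpty n = pvGridOf n (fun _ _ => 0) := rfl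
  rw [he, pvAddRect_gridOf, pvAddRect_gridOf]
  show _ = pvGridOf n (fun r c => pvStCell [".....", "..##.", ".####", ".####", "..##."] r c)
  apply pvGridOf_congr
  intro r c hr0 hr1 hc0 hc1
  rw [pv_st4 r c hr0 hc0]
  split_ifs <;> omega

lemma pv_pat5 (n : Int) :
    pvAddRect n (pvAddRect n (pvAddRect n (pvAddRect n (pvAddRect n (pvEmpty n) 1 1 1 4) 1 1 4 1) 4 1 4 4) 2 4 4 4) 2 2 2 3
    = (PySem.List.pyRange 0 n 1).map (fun r => (PySem.List.pyRange 0 n 1).map (fun c =>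
        pvStCell [".....", ".####", ".####", ".#..#", ".####"] r c)) := by
  have he : pvEmpty n = pvGridOf n (fun _ _ => 0) := rfl
  rw [he, pvAddRect_gridOf, pvAddRect_gridOf, pvAddRect_gridOf, pvAddRect_gridOf, pvAddRect_gridOf]
  show _ = pvGridOf n (fun r c => pvStCell [".....", ".####", ".####", ".#..#", ".####"] r c)
  apply pvGridOf_congr
  intro r c hr0 hr1 hc0 hc1
  rw [pv_st5 r c hr0 hc0]
  split_ifs <;> omega

-- ===== VERDICT (by name: the statement is the Claim_ definition above) =====
theorem build_patterns_py_spec : Claim_equal_build_patterns_py := by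
  intro n _
  unfold Spec_build_patterns_py build_patterns_py build_patterns_py_alt pvStencils
  simp only [List.map_cons, List.map_nil]
  rw [pv_pat1 n, pv_pat2 n, pv_pat3 n, pv_pat4 n, pv_pat5 n]
  rfl
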